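-- pv_equiv track=rewrite | github.com/jmihan/data_fusion_guardian | src/sol154/solution2/train_last_n_pooling.py | get_branch_cat_cols
-- ===== SOURCE A (Python) =====
-- from typing import Dict, List, Tuple, Optional
--
-- STABLE_CAT_COLS_BASE = [
--     "event_desc",
--     "event_type_nm",
--     "channel_indicator_type",
--     "channel_indicator_sub_type",
--     "mcc_code",
--     "pos_cd",
--     "currency_iso_cd",
--     "timezone",
-- ]
--
-- TELEMETRY_CAT_COLS_BASE = [
--     "browser_language",
--     "operating_system_type",
--     "developer_tools",
--     "phone_voip_call_state",
--     "web_rdp_connection",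
--     "compromised",
--     "accept_lang_primary",
-- ]
--
-- def get_branch_cat_cols(active_cat_cols: List[str]) -> Tuple[List[str], List[str]]:
--     stable_set = set(STABLE_CAT_COLS_BASE)
--     telemetry_set = set(TELEMETRY_CAT_COLS_BASE)
--
--     stable = [c for c in active_cat_cols if c in stable_set]
--     telemetry = [c for c in active_cat_cols if c in telemetry_set]
--     unknown = [c for c in active_cat_cols if c not in stable_set and c not in telemetry_set]
--     if unknown:
--         raise ValueError(f"Unassigned categorical columns found: {unknown}")
--     return stable, telemetry
-- ===== SOURCE B (Python) =====
-- STABLE_CAT_COLS_BASE = [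
--     "event_desc",
--     "event_type_nm",
--     "channel_indicator_type",
--     "channel_indicator_sub_type",
--     "mcc_code",
--     "pos_cd",
--     "currency_iso_cd",
--     "timezone",
-- ]
--
-- TELEMETRY_CAT_COLS_BASE = [
--     "browser_language",
--     "operating_system_type",
--     "developer_tools",
--     "phone_voip_call_state",
--     "web_rdp_connection",
--     "compromised",
--     "accept_lang_primary",
-- ]
--
-- def get_branch_cat_cols(active_cat_cols):
--     stable_set = set(STABLE_CAT_COLS_BASE)
--     telemetry_set = set(TELEMETRY_CAT_COLS_BASE)
--     stable, telemetry, unknown = [], [], []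
--     for c in active_cat_cols:
--         if c in stable_set:
--             stable.append(c)
--         elif c in telemetry_set:
--             telemetry.append(c)
--         else:
--             unknown.append(c)
--     if unknown:
--         raise ValueError(f"Unassigned categorical columns found: {unknown}")
--     return stable, telemetry
-- ===== Notes on version B (the rewrite author's own statement) =====
-- stated objective: alternative
-- what changed: Replaces A's three separate comprehension scans over active_cat_cols with one loop that classifies each column into stable/telemetry/unknown accumulators in a single pass.
import Mathlib
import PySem

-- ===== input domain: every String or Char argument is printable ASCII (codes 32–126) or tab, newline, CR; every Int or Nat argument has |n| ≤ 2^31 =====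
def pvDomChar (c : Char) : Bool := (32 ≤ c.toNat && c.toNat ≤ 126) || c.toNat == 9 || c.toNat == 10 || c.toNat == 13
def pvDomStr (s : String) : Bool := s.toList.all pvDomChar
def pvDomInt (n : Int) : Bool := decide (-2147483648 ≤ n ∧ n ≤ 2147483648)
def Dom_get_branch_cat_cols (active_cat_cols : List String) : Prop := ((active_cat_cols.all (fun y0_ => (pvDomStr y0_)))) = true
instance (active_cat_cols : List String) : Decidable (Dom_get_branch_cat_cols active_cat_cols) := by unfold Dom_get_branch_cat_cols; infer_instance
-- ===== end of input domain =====

-- B replaces A's three comprehension scans with one classifying pass over active_cat_cols (alternative decomposition, same cost class).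

def STABLE_CAT_COLS_BASE : List String :=
  ["event_desc", "event_type_nm", "channel_indicator_type", "channel_indicator_sub_type",
   "mcc_code", "pos_cd", "currency_iso_cd", "timezone"]

def TELEMETRY_CAT_COLS_BASE : List String :=
  ["browser_language", "operating_system_type", "developer_tools", "phone_voip_call_state",
   "web_rdp_connection", "compromised", "accept_lang_primary"]

-- ===== PORT A =====
-- A raises ValueError when some column is in neither base set; Pre_ excludes those inputs,
-- so the port returns the (stable, telemetry) pair A returns on admitted inputs.
def get_branch_cat_cols (active_cat_cols : List String) : List String × List String :=
  let stable_set : PySem.Set String := PySem.Set.ofList STABLE_CAT_COLS_BASE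
  let telemetry_set : PySem.Set String := PySem.Set.ofList TELEMETRY_CAT_COLS_BASE
  let stable := active_cat_cols.filter (fun c => PySem.Set.contains stable_set c)
  let telemetry := active_cat_cols.filter (fun c => PySem.Set.contains telemetry_set c)
  (stable, telemetry)

-- ===== PORT B =====
def get_branch_cat_cols_alt (active_cat_cols : List String) : List String × List String :=
  let stable_set : PySem.Set String := PySem.Set.ofList STABLE_CAT_COLS_BASE
  let telemetry_set : PySem.Set String := PySem.Set.ofList TELEMETRY_CAT_COLS_BASE
  let acc := active_cat_cols.foldl
    (fun (acc : List String × List String × List String) c =>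
      if PySem.Set.contains stable_set c then (acc.1 ++ [c], acc.2.1, acc.2.2)
      else if PySem.Set.contains telemetry_set c then (acc.1, acc.2.1 ++ [c], acc.2.2)
      else (acc.1, acc.2.1, acc.2.2 ++ [c]))
    ([], [], [])
  (acc.1, acc.2.1)

-- ===== PRECONDITION & SPEC =====
-- Pre_ excludes exactly the inputs on which A (and B) raise ValueError: some column in neither base list.
def Pre_get_branch_cat_cols (active_cat_cols : List String) : Prop :=
  ∀ c ∈ active_cat_cols, c ∈ STABLE_CAT_COLS_BASE ∨ c ∈ TELEMETRY_CAT_COLS_BASE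
instance (active_cat_cols : List String) : Decidable (Pre_get_branch_cat_cols active_cat_cols) := by
  unfold Pre_get_branch_cat_cols; infer_instance

def pvWitness_get_branch_cat_cols : List String := ["mcc_code", "compromised", "timezone"]

def Spec_get_branch_cat_cols (active_cat_cols : List String) (out : List String × List String) : Prop := out = get_branch_cat_cols_alt active_cat_cols
instance (active_cat_cols : List String) (out : List String × List String) : Decidable (Spec_get_branch_cat_cols active_cat_cols out) := by unfold Spec_get_branch_cat_cols; infer_instance

-- ===== CLAIM (what is proved, stated in full; the proofs are below) =====
def Claim_equal_get_branch_cat_cols : Prop := ∀ (active_cat_cols : List String), Dom_get_branch_cat_cols active_cat_cols → Pre_get_branch_cat_cols active_cat_cols → Spec_get_branch_cat_cols active_cat_cols (get_branch_cat_cols active_cat_cols)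

-- ===== LEMMAS AND PROOFS =====

-- The two base lists are disjoint (as membership of any string).
theorem stable_telem_disjoint (c : String) :
    c ∈ STABLE_CAT_COLS_BASE → c ∈ TELEMETRY_CAT_COLS_BASE → False := by
  intro hs ht
  simp [STABLE_CAT_COLS_BASE] at hs
  rcases hs with h | h | h | h | h | h | h | h <;> subst h <;>
    simp [TELEMETRY_CAT_COLS_BASE] at ht

-- Characterisation of B's single-pass fold from an arbitrary accumulator.
theorem fold_classify (xs : List String) (s t u : List String)
    (hxs : ∀ c ∈ xs, c ∈ STABLE_CAT_COLS_BASE ∨ c ∈ TELEMETRY_CAT_COLS_BASE) :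
    xs.foldl
      (fun (acc : List String × List String × List String) c =>
        if PySem.Set.contains (PySem.Set.ofList STABLE_CAT_COLS_BASE) c then (acc.1 ++ [c], acc.2.1, acc.2.2)
        else if PySem.Set.contains (PySem.Set.ofList TELEMETRY_CAT_COLS_BASE) c then (acc.1, acc.2.1 ++ [c], acc.2.2)
        else (acc.1, acc.2.1, acc.2.2 ++ [c]))
      (s, t, u)
    = (s ++ xs.filter (fun c => PySem.Set.contains (PySem.Set.ofList STABLE_CAT_COLS_BASE) c),
       t ++ xs.filter (fun c => PySem.Set.contains (PySem.Set.ofList TELEMETRY_CAT_COLS_BASE) c),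
       u ++ xs.filter (fun c => !PySem.Set.contains (PySem.Set.ofList STABLE_CAT_COLS_BASE) c
                              && !PySem.Set.contains (PySem.Set.ofList TELEMETRY_CAT_COLS_BASE) c)) := by
  induction xs generalizing s t u with
  | nil => simp
  | cons c cs ih =>
    have hc := hxs c (List.mem_cons_self ..)
    have hcs : ∀ d ∈ cs, d ∈ STABLE_CAT_COLS_BASE ∨ d ∈ TELEMETRY_CAT_COLS_BASE :=
      fun d hd => hxs d (List.mem_cons_of_mem _ hd)
    by_cases hS : PySem.Set.contains (PySem.Set.ofList STABLE_CAT_COLS_BASE) c = true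
    · have hS' : c ∈ STABLE_CAT_COLS_BASE :=
        (PySem.Set.mem_ofList _ _).mp ((PySem.Set.contains_iff _ _).mp hS)
      have hT' : c ∉ TELEMETRY_CAT_COLS_BASE := fun h => stable_telem_disjoint c hS' h
      have hT : PySem.Set.contains (PySem.Set.ofList TELEMETRY_CAT_COLS_BASE) c = false := by
        by_contra h
        simp only [Bool.not_eq_false] at h
        exact hT' ((PySem.Set.mem_ofList _ _).mp ((PySem.Set.contains_iff _ _).mp h))
      simp only [List.foldl_cons, hS, hT, if_true, Bool.false_eq_true, if_false]
      rw [ih _ _ _ hcs]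
      simp [List.filter_cons, hS, hT, hS', hT', List.append_assoc]
    · simp only [Bool.not_eq_true] at hS
      have hS' : c ∉ STABLE_CAT_COLS_BASE := fun h => by
        have := (PySem.Set.contains_iff _ _).mpr ((PySem.Set.mem_ofList _ _).mpr h)
        rw [hS] at this; exact Bool.false_ne_true this
      by_cases hT : PySem.Set.contains (PySem.Set.ofList TELEMETRY_CAT_COLS_BASE) c = true
      · have hT' : c ∈ TELEMETRY_CAT_COLS_BASE :=
          (PySem.Set.mem_ofList _ _).mp ((PySem.Set.contains_iff _ _).mp hT)
        simp only [List.foldl_cons, hS, hT, if_true, Bool.false_eq_true, if_false]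
        rw [ih _ _ _ hcs]
        simp [List.filter_cons, hS, hT, hS', hT', List.append_assoc]
      · simp only [Bool.not_eq_true] at hT
        have hT' : c ∉ TELEMETRY_CAT_COLS_BASE := fun h => by
          have := (PySem.Set.contains_iff _ _).mpr ((PySem.Set.mem_ofList _ _).mpr h)
          rw [hT] at this; exact Bool.false_ne_true this
        exact absurd hc (by simp [hS', hT'])

-- ===== VERDICT (by name: the statement is the Claim_ definition above) =====
theorem get_branch_cat_cols_spec : Claim_equal_get_branch_cat_cols := by
  intro xs _ hpre
  unfold Spec_get_branch_cat_cols get_branch_cat_cols get_branch_cat_cols_alt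
  simp only []
  rw [fold_classify xs [] [] [] hpre]
  simp
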